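-- pv_equiv track=rewrite | github.com/github991127/Zhangchangpu | source/zhangchangpu_AI.py | easy
-- ===== SOURCE A (Python) =====
-- def easy(solution):
--     kaka_card = []
--     player_card = []
--     max_length = 0
--     # 获取方案的最大长度
--     for i in range(len(solution)):
--         max_length = max(max_length, len(solution[i][0]) + len(solution[i][1]))
--     # 从最大长度的方案中进行比较,选择相差数量大的方案
--     max_difference = -1
--     for i in range(len(solution)):
--         if (len(solution[i][0]) + len(solution[i][1]) == max_length):
--             # 求绝对值
--             if (abs(len(solution[i][0]) - len(solution[i][1])) > max_difference):
--                 max_difference = abs(len(solution[i][0]) - len(solution[i][1]))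
--                 if (len(solution[i][0]) - len(solution[i][1]) >= 0):
--                     kaka_card = solution[i][0]
--                     player_card = solution[i][1]
--                 else:
--                     kaka_card = solution[i][1]
--                     player_card = solution[i][0]
--     return player_card, kaka_card
-- ===== SOURCE B (Python) =====
-- def easy(solution):
--     # Stable reverse sort by (total length, absolute difference); first element
--     # of the ranking is the first-occurring best pair, then orient it by sign.
--     ranked = sorted(solution,
--                     key=lambda s: (len(s[0]) + len(s[1]), abs(len(s[0]) - len(s[1]))),
--                     reverse=True)
--     if not ranked:
--         return [], []
--     best = ranked[0]
--     if len(best[0]) >= len(best[1]):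
--         return best[1], best[0]
--     return best[0], best[1]
-- ===== Notes on version B (the rewrite author's own statement) =====
-- stated objective: alternative
-- what changed: Replaced A's two stateful index loops (a max-total-length pass, then a selection pass tracking max_difference with three mutable variables) by a stable reverse sort of the whole list under the lexicographic key (total length, absolute difference) and taking the first element of the ranking, oriented by one sign test.
import Mathlib
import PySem

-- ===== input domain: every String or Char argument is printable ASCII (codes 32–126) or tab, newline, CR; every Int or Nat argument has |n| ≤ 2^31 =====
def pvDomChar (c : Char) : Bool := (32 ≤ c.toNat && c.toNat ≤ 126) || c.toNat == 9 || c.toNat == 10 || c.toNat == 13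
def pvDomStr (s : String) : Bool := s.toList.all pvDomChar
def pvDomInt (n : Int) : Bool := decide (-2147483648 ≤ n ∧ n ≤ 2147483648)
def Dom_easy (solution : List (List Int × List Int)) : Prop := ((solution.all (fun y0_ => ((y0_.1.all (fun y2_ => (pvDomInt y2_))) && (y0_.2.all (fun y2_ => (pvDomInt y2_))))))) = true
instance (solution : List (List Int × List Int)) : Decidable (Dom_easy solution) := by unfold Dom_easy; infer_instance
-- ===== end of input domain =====

-- B replaces A's two stateful index loops by a stable reverse sort under the lexicographic
-- key (total length, absolute difference) followed by taking the first ranked pair and one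
-- sign test to orient it (objective: alternative algorithm, same result).

-- ===== PORT A =====
def easy (solution : List (List Int × List Int)) : List Int × List Int :=
  let maxLength : Int :=
    (PySem.List.pyRange 0 (PySem.List.len solution) 1).foldl
      (fun ml i =>
        max ml (PySem.List.len (PySem.List.pyGetD solution i ([], [])).1 +
                PySem.List.len (PySem.List.pyGetD solution i ([], [])).2)) 0
  let st : Int × List Int × List Int :=
    (PySem.List.pyRange 0 (PySem.List.len solution) 1).foldl
      (fun st i =>
        if PySem.List.len (PySem.List.pyGetD solution i ([], [])).1 +
           PySem.List.len (PySem.List.pyGetD solution i ([], [])).2 = maxLength then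
          if |PySem.List.len (PySem.List.pyGetD solution i ([], [])).1 -
              PySem.List.len (PySem.List.pyGetD solution i ([], [])).2| > st.1 then
            if PySem.List.len (PySem.List.pyGetD solution i ([], [])).1 -
               PySem.List.len (PySem.List.pyGetD solution i ([], [])).2 ≥ 0 then
              (|PySem.List.len (PySem.List.pyGetD solution i ([], [])).1 -
                PySem.List.len (PySem.List.pyGetD solution i ([], [])).2|,
               (PySem.List.pyGetD solution i ([], [])).1,
               (PySem.List.pyGetD solution i ([], [])).2)
            else
              (|PySem.List.len (PySem.List.pyGetD solution i ([], [])).1 -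
                PySem.List.len (PySem.List.pyGetD solution i ([], [])).2|,
               (PySem.List.pyGetD solution i ([], [])).2,
               (PySem.List.pyGetD solution i ([], [])).1)
          else st
        else st)
      ((-1 : Int), ([] : List Int), ([] : List Int))
  (st.2.2, st.2.1)

-- ===== PORT B =====
-- Source B: ranked = sorted(solution, key=(total, absdiff), reverse=True); ranked[0] after the
-- empty guard is the head of the ranking, taken here by matching on the sorted list.
def easy_alt (solution : List (List Int × List Int)) : List Int × List Int :=
  match PySem.List.sorted2 solution
      (fun s => PySem.List.len s.1 + PySem.List.len s.2)
      (fun s => |PySem.List.len s.1 - PySem.List.len s.2|) true with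
  | [] => ([], [])
  | best :: _ =>
      if PySem.List.len best.1 ≥ PySem.List.len best.2 then (best.2, best.1)
      else (best.1, best.2)

-- ===== PRECONDITION & SPEC =====
def Spec_easy (solution : List (List Int × List Int)) (out : List Int × List Int) : Prop := out = easy_alt solution
instance (solution : List (List Int × List Int)) (out : List Int × List Int) : Decidable (Spec_easy solution out) := by unfold Spec_easy; infer_instance

-- ===== CLAIM (what is proved, stated in full; the proofs are below) =====
def Claim_equal_easy : Prop := ∀ (solution : List (List Int × List Int)), Dom_easy solution → Spec_easy solution (easy solution)

-- ===== LEMMAS AND PROOFS =====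

-- total length and absolute difference of a pair (the two components of B's sort key)
def pvT (s : List Int × List Int) : Int := PySem.List.len s.1 + PySem.List.len s.2
def pvD (s : List Int × List Int) : Int := |PySem.List.len s.1 - PySem.List.len s.2|

-- the step function of A's second loop (after the range/index fold is rewritten to a list fold)
def pvAstep (M : Int) (st : Int × List Int × List Int) (s : List Int × List Int) :
    Int × List Int × List Int :=
  if pvT s = M then
    if pvD s > st.1 then
      if PySem.List.len s.1 - PySem.List.len s.2 ≥ 0 then (pvD s, s.1, s.2)
      else (pvD s, s.2, s.1)
    else st
  else st

-- running "first maximal element under the lexicographic key" (the head of B's ranking)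
def pvBstep (acc : Option (List Int × List Int)) (x : List Int × List Int) :
    Option (List Int × List Int) :=
  match acc with
  | none => some x
  | some m =>
      if (decide (pvT m < pvT x) || !decide (pvT x < pvT m) && decide (pvD m < pvD x)) = true
      then some x else some m

-- abstraction function: A's loop state as a function of B's running best
def pvPhi (M : Int) (m : Option (List Int × List Int)) : Int × List Int × List Int :=
  match m with
  | none => (-1, [], [])
  | some b =>
      if pvT b = M then
        if PySem.List.len b.1 - PySem.List.len b.2 ≥ 0 then (pvD b, b.1, b.2)
        else (pvD b, b.2, b.1)
      else (-1, [], [])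

-- head of one insertion step depends only on the head of the accumulator
theorem pvHead_insertBy {α : Type} (before : α → α → Bool) (x : α) (acc : List α) :
    (PySem.List.insertBy before x acc).head? =
      match acc.head? with
      | none => some x
      | some y => if before x y then some x else some y := by
  cases acc with
  | nil => rfl
  | cons y ys =>
      simp only [PySem.List.insertBy, List.head?_cons]
      split <;> simp_all

-- head of the whole insertion-sort fold = fold of the head-only step
theorem pvHead_foldl {α : Type} (before : α → α → Bool) (xs : List α) :
    ∀ acc : List α,
      (xs.foldl (fun acc x => PySem.List.insertBy before x acc) acc).head? =
        xs.foldl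
          (fun m x =>
            match m with
            | none => some x
            | some y => if before x y then some x else some y)
          acc.head? := by
  induction xs with
  | nil => intro acc; rfl
  | cons x t ih =>
      intro acc
      simp only [List.foldl_cons]
      rw [ih, pvHead_insertBy]

-- the head of B's stable reverse ranking is B-fold's running first maximal
theorem pvSortedHead (l : List (List Int × List Int)) :
    (PySem.List.sorted2 l
        (fun s => PySem.List.len s.1 + PySem.List.len s.2)
        (fun s => |PySem.List.len s.1 - PySem.List.len s.2|) true).head? =
      l.foldl pvBstep none := by
  unfold PySem.List.sorted2
  rw [pvHead_foldl]
  simp only [List.head?_nil]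
  congr 1
  funext m x
  cases m with
  | none => rfl
  | some y => rfl

theorem pvT_nonneg (s : List Int × List Int) : (0 : Int) ≤ pvT s := by
  simp [pvT, PySem.List.len_eq]; positivity

theorem pvBfold_isSome (l : List (List Int × List Int)) (m : List Int × List Int) :
    ∃ b, l.foldl pvBstep (some m) = some b := by
  induction l generalizing m with
  | nil => exact ⟨m, rfl⟩
  | cons x t ih =>
      simp only [List.foldl_cons, pvBstep]
      split <;> exact ih _

theorem pvBfold_le (l : List (List Int × List Int)) (m b : List Int × List Int)
    (h : l.foldl pvBstep (some m) = some b) :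
    pvT m ≤ pvT b ∧ (∀ x ∈ l, pvT x ≤ pvT b) ∧ (b = m ∨ b ∈ l) := by
  induction l generalizing m with
  | nil => simp_all
  | cons x t ih =>
      simp only [List.foldl_cons, pvBstep] at h
      split at h
      · rename_i hc
        simp only [Bool.or_eq_true, Bool.and_eq_true, decide_eq_true_eq,
          Bool.not_eq_eq_eq_not, Bool.not_true, decide_eq_false_iff_not, not_lt] at hc
        obtain ⟨h1, h2, h3⟩ := ih _ h
        refine ⟨by omega, ?_, ?_⟩
        · intro y hy
          rcases List.mem_cons.mp hy with rfl | hy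
          · exact h1
          · exact h2 _ hy
        · rcases h3 with h3 | h3
          · exact Or.inr (h3 ▸ List.mem_cons_self)
          · exact Or.inr (List.mem_cons_of_mem _ h3)
      · rename_i hc
        simp only [Bool.or_eq_true, Bool.and_eq_true, decide_eq_true_eq,
          Bool.not_eq_eq_eq_not, Bool.not_true, decide_eq_false_iff_not, not_lt] at hc
        push Not at hc
        obtain ⟨h1, h2, h3⟩ := ih _ h
        refine ⟨h1, ?_, ?_⟩
        · intro y hy
          rcases List.mem_cons.mp hy with rfl | hy
          · omega
          · exact h2 _ hy
        · rcases h3 with h3 | h3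
          · exact Or.inl h3
          · exact Or.inr (List.mem_cons_of_mem _ h3)

theorem pvInv (M : Int) (l : List (List Int × List Int)) (m : Option (List Int × List Int))
    (hl : ∀ x ∈ l, pvT x ≤ M) (hm : ∀ b, m = some b → pvT b ≤ M) :
    l.foldl (pvAstep M) (pvPhi M m) = pvPhi M (l.foldl pvBstep m) := by
  induction l generalizing m with
  | nil => rfl
  | cons h t ih =>
      have hh : pvT h ≤ M := hl h List.mem_cons_self
      have hd : (0 : Int) ≤ pvD h := abs_nonneg _
      have hstep : pvAstep M (pvPhi M m) h = pvPhi M (pvBstep m h) := by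
        match m with
        | none =>
            by_cases h1 : pvT h = M
            · simp only [pvAstep, pvPhi, pvBstep, if_pos h1,
                if_pos (show pvD h > (-1 : Int) by omega)]
            · simp only [pvAstep, pvPhi, pvBstep, if_neg h1]
        | some b =>
            have hb : pvT b ≤ M := hm b rfl
            have hdb : (0 : Int) ≤ pvD b := abs_nonneg _
            simp only [pvBstep]
            by_cases hc : (decide (pvT b < pvT h) ||
                !decide (pvT h < pvT b) && decide (pvD b < pvD h)) = true
            · rw [if_pos hc]
              simp only [Bool.or_eq_true, Bool.and_eq_true, decide_eq_true_eq,
                Bool.not_eq_eq_eq_not, Bool.not_true, decide_eq_false_iff_not, not_lt] at hc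
              simp only [pvAstep, pvPhi]
              split_ifs <;> first | rfl | (exfalso; omega)
            · rw [if_neg hc]
              simp only [Bool.or_eq_true, Bool.and_eq_true, decide_eq_true_eq,
                Bool.not_eq_eq_eq_not, Bool.not_true, decide_eq_false_iff_not, not_lt] at hc
              push Not at hc
              simp only [pvAstep, pvPhi]
              split_ifs <;> first | rfl | (exfalso; omega)
      have hm' : ∀ b, pvBstep m h = some b → pvT b ≤ M := by
        intro b hb
        match m with
        | none => simp only [pvBstep] at hb; cases hb; exact hh
        | some m0 =>
            simp only [pvBstep] at hb
            split at hb <;> cases hb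
            · exact hh
            · exact hm _ rfl
      rw [List.foldl_cons, hstep, List.foldl_cons,
        ih _ (fun x hx => hl x (List.mem_cons_of_mem _ hx)) hm']

theorem pvMaxLen_le (l : List (List Int × List Int)) (c : Int) :
    ∀ init : Int, (∀ x ∈ l, pvT x ≤ c) → init ≤ c →
      l.foldl (fun ml s => max ml (pvT s)) init ≤ c := by
  induction l with
  | nil => exact fun _ _ hi => hi
  | cons h t ih =>
      intro init hl hi
      exact ih _ (fun x hx => hl x (List.mem_cons_of_mem _ hx))
        (max_le hi (hl h List.mem_cons_self))

theorem pvMain (l : List (List Int × List Int)) :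
    ((l.foldl (pvAstep (l.foldl (fun ml s => max ml (pvT s)) 0))
        ((-1 : Int), ([] : List Int), ([] : List Int))).2.2,
     (l.foldl (pvAstep (l.foldl (fun ml s => max ml (pvT s)) 0))
        ((-1 : Int), ([] : List Int), ([] : List Int))).2.1) =
    (match l.foldl pvBstep none with
     | none => (([] : List Int), ([] : List Int))
     | some best =>
         if PySem.List.len best.1 ≥ PySem.List.len best.2 then (best.2, best.1)
         else (best.1, best.2)) := by
  cases l with
  | nil => rfl
  | cons h t =>
      have hfold0 : (h :: t).foldl pvBstep none = t.foldl pvBstep (some h) := rfl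
      obtain ⟨b, hb⟩ := pvBfold_isSome t h
      obtain ⟨hbh, hbt, hbmem⟩ := pvBfold_le t h b hb
      have hle : ∀ x ∈ (h :: t), pvT x ≤ (h :: t).foldl (fun ml s => max ml (pvT s)) 0 :=
        (PySem.List.le_foldl_max_int (h :: t) pvT 0).2
      have hub : ∀ x ∈ (h :: t), pvT x ≤ pvT b := by
        intro x hx
        rcases List.mem_cons.mp hx with rfl | hx
        · exact hbh
        · exact hbt _ hx
      have hbM : pvT b = (h :: t).foldl (fun ml s => max ml (pvT s)) 0 := by
        have hx1 : pvT b ≤ (h :: t).foldl (fun ml s => max ml (pvT s)) 0 := by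
          rcases hbmem with h3 | h3
          · exact h3 ▸ hle h List.mem_cons_self
          · exact hle b (List.mem_cons_of_mem _ h3)
        have hx2 := pvMaxLen_le (h :: t) (pvT b) 0 hub (le_trans (pvT_nonneg h) hbh)
        omega
      have hinv := pvInv ((h :: t).foldl (fun ml s => max ml (pvT s)) 0) (h :: t) none hle
        (fun b hb => nomatch hb)
      rw [hfold0, hb] at hinv ⊢
      rw [show pvPhi ((h :: t).foldl (fun ml s => max ml (pvT s)) 0) none
            = ((-1 : Int), ([] : List Int), ([] : List Int)) from rfl] at hinv
      rw [hinv]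
      simp only [pvPhi]
      rw [if_pos hbM]
      split_ifs <;> first | rfl | (exfalso; omega)

-- B's result expressed through the head of the ranking
theorem pvAlt_eq (solution : List (List Int × List Int)) :
    easy_alt solution =
      (match solution.foldl pvBstep none with
       | none => (([] : List Int), ([] : List Int))
       | some best =>
           if PySem.List.len best.1 ≥ PySem.List.len best.2 then (best.2, best.1)
           else (best.1, best.2)) := by
  have h := pvSortedHead solution
  unfold easy_alt
  cases hs : PySem.List.sorted2 solution
      (fun s => PySem.List.len s.1 + PySem.List.len s.2)
      (fun s => |PySem.List.len s.1 - PySem.List.len s.2|) true with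
  | nil => rw [hs] at h; simp only [List.head?_nil] at h; rw [← h]
  | cons best rest => rw [hs] at h; simp only [List.head?_cons] at h; rw [← h]

-- ===== VERDICT (by name: the statement is the Claim_ definition above) =====
theorem easy_spec : Claim_equal_easy := by
  intro solution _
  unfold Spec_easy easy
  rw [pvAlt_eq]
  have h1 : (PySem.List.pyRange 0 (PySem.List.len solution) 1).foldl
      (fun ml i =>
        max ml (PySem.List.len (PySem.List.pyGetD solution i ([], [])).1 +
                PySem.List.len (PySem.List.pyGetD solution i ([], [])).2)) 0
      = solution.foldl (fun ml s => max ml (pvT s)) 0 := by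
    have h := PySem.List.foldl_pyRange_pyGetD solution ([], [])
      (fun ml (s : List Int × List Int) => max ml (pvT s)) (0 : Int) (le_refl 0)
    simp only [Int.toNat_zero, List.drop_zero] at h
    exact h
  have h2 := PySem.List.foldl_pyRange_pyGetD solution ([], [])
    (pvAstep ((PySem.List.pyRange 0 (PySem.List.len solution) 1).foldl
      (fun ml i =>
        max ml (PySem.List.len (PySem.List.pyGetD solution i ([], [])).1 +
                PySem.List.len (PySem.List.pyGetD solution i ([], [])).2)) 0))
    ((-1 : Int), ([] : List Int), ([] : List Int)) (le_refl 0)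
  simp only [Int.toNat_zero, List.drop_zero] at h2
  conv at h2 => rhs; rw [h1]
  exact (congrArg (fun st : Int × List Int × List Int => (st.2.2, st.2.1)) h2).trans
    (pvMain solution)
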